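-- pv_equiv track=rewrite | github.com/joacod/lawrence | src/agents/po_agent.py | _are_questions_about_same_topic
-- ===== SOURCE A (Python) =====
-- def _are_questions_about_same_topic(question1: str, question2: str) -> bool:
--     """
--     Check if two questions are about the same topic.
--
--     Args:
--         question1 (str): First question (lowercase)
--         question2 (str): Second question (lowercase)
--
--     Returns:
--         bool: True if questions are about the same topic
--     """
--     # Extract key topic words from questions with more granular detection
--     def extract_topics(question: str) -> set:
--         topics = set()
--
--         # Authentication topics
--         if any(word in question for word in ['2fa', 'two factor', 'authentication', 'additional authentication']):
--             topics.add('2fa')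
--
--         # Password reset topics
--         if any(word in question for word in ['password reset', 'forgotten password', 'forgot password', 'password recovery']):
--             topics.add('password_reset')
--
--         # Registration topics
--         if any(word in question for word in ['register', 'registration', 'sign up', 'account creation']):
--             topics.add('registration')
--
--         # Password complexity topics
--         if any(word in question for word in ['password complexity', 'password rules', 'password requirements', 'minimum length', 'special characters', 'uppercase', 'lowercase', 'numbers']):
--             topics.add('password_complexity')
--
--         # Password attempts/security topics
--         if any(word in question for word in ['wrong password', 'incorrect password', 'failed attempts', 'attempts', 'lock account', 'lockout', 'brute force', 'wait', 'hour']):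
--             topics.add('password_attempts')
--
--         # General security topics
--         if 'security' in question:
--             topics.add('security')
--
--         # Email topics
--         if 'email' in question:
--             topics.add('email')
--
--         # User management topics
--         if any(word in question for word in ['user', 'account', 'profile', 'role']):
--             topics.add('user_management')
--
--         return topics
--
--     topics1 = extract_topics(question1)
--     topics2 = extract_topics(question2)
--
--     # If they share any topic, they're about the same subject
--     return bool(topics1 & topics2)
-- ===== SOURCE B (Python) =====
-- # Table-driven single pass: one keyword table, one short-circuiting scan that
-- # checks each topic's keywords against both questions at once (no sets built).
-- _TOPIC_KEYWORDS = [
--     ['2fa', 'two factor', 'authentication', 'additional authentication'],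
--     ['password reset', 'forgotten password', 'forgot password', 'password recovery'],
--     ['register', 'registration', 'sign up', 'account creation'],
--     ['password complexity', 'password rules', 'password requirements', 'minimum length',
--      'special characters', 'uppercase', 'lowercase', 'numbers'],
--     ['wrong password', 'incorrect password', 'failed attempts', 'attempts',
--      'lock account', 'lockout', 'brute force', 'wait', 'hour'],
--     ['security'],
--     ['email'],
--     ['user', 'account', 'profile', 'role'],
-- ]
--
--
-- def _are_questions_about_same_topic(question1: str, question2: str) -> bool:
--     for kws in _TOPIC_KEYWORDS:
--         if any(w in question1 for w in kws) and any(w in question2 for w in kws):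
--             return True
--     return False
-- ===== Notes on version B (the rewrite author's own statement) =====
-- stated objective: simpler
-- what changed: Replaces A's two per-question topic-set extractions plus a set intersection by a single short-circuiting pass over one keyword table, checking each topic's keywords against both questions at once and never building the sets.
import Mathlib
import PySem

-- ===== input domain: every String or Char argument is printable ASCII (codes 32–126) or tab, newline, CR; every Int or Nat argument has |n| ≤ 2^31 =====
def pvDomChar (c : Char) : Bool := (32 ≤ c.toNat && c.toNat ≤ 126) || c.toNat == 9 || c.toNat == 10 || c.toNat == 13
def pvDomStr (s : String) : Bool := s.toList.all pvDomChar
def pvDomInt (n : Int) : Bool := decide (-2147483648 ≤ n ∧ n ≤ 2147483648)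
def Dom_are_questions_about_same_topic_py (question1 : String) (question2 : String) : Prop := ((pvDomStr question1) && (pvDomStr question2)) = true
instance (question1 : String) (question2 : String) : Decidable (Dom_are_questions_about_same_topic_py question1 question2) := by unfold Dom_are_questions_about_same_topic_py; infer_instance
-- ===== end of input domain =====

-- B replaces A's two per-question topic-set extractions + set intersection by one
-- short-circuiting pass over a keyword table, checking both questions per topic (objective: simpler).

-- ===== PORT A =====
-- helper: port of A's inner 'extract_topics' (builds the topic set with conditional adds)
def pvExtractTopics (question : String) : PySem.Set String :=
  let topics : PySem.Set String := PySem.Set.empty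
  let topics := if ["2fa", "two factor", "authentication", "additional authentication"].any (fun w => PySem.Str.isIn w question) then PySem.Set.add topics "2fa" else topics
  let topics := if ["password reset", "forgotten password", "forgot password", "password recovery"].any (fun w => PySem.Str.isIn w question) then PySem.Set.add topics "password_reset" else topics
  let topics := if ["register", "registration", "sign up", "account creation"].any (fun w => PySem.Str.isIn w question) then PySem.Set.add topics "registration" else topics
  let topics := if ["password complexity", "password rules", "password requirements", "minimum length", "special characters", "uppercase", "lowercase", "numbers"].any (fun w => PySem.Str.isIn w question) then PySem.Set.add topics "password_complexity" else topics
  let topics := if ["wrong password", "incorrect password", "failed attempts", "attempts", "lock account", "lockout", "brute force", "wait", "hour"].any (fun w => PySem.Str.isIn w question) then PySem.Set.add topics "password_attempts" else topics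
  let topics := if PySem.Str.isIn "security" question then PySem.Set.add topics "security" else topics
  let topics := if PySem.Str.isIn "email" question then PySem.Set.add topics "email" else topics
  let topics := if ["user", "account", "profile", "role"].any (fun w => PySem.Str.isIn w question) then PySem.Set.add topics "user_management" else topics
  topics

def are_questions_about_same_topic_py (question1 : String) (question2 : String) : Bool :=
  let topics1 := pvExtractTopics question1
  let topics2 := pvExtractTopics question2
  !(PySem.Set.inter topics1 topics2).isEmpty

-- ===== PORT B =====
def pvTopicKeywords : List (List String) :=
  [ ["2fa", "two factor", "authentication", "additional authentication"],
    ["password reset", "forgotten password", "forgot password", "password recovery"],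
    ["register", "registration", "sign up", "account creation"],
    ["password complexity", "password rules", "password requirements", "minimum length", "special characters", "uppercase", "lowercase", "numbers"],
    ["wrong password", "incorrect password", "failed attempts", "attempts", "lock account", "lockout", "brute force", "wait", "hour"],
    ["security"],
    ["email"],
    ["user", "account", "profile", "role"] ]

def are_questions_about_same_topic_py_alt (question1 : String) (question2 : String) : Bool :=
  pvTopicKeywords.any (fun kws =>
    kws.any (fun w => PySem.Str.isIn w question1) && kws.any (fun w => PySem.Str.isIn w question2))

-- ===== PRECONDITION & SPEC =====
def Spec_are_questions_about_same_topic_py (question1 : String) (question2 : String) (out : Bool) : Prop := out = are_questions_about_same_topic_py_alt question1 question2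
instance (question1 : String) (question2 : String) (out : Bool) : Decidable (Spec_are_questions_about_same_topic_py question1 question2 out) := by unfold Spec_are_questions_about_same_topic_py; infer_instance

-- ===== CLAIM (what is proved, stated in full; the proofs are below) =====
def Claim_equal_are_questions_about_same_topic_py : Prop := ∀ (question1 : String) (question2 : String), Dom_are_questions_about_same_topic_py question1 question2 → Spec_are_questions_about_same_topic_py question1 question2 (are_questions_about_same_topic_py question1 question2)

-- ===== LEMMAS AND PROOFS =====

-- the named topic table (names paired with their keyword lists, in A's order)
def pvTable : List (String × List String) :=
  [ ("2fa", ["2fa", "two factor", "authentication", "additional authentication"]),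
    ("password_reset", ["password reset", "forgotten password", "forgot password", "password recovery"]),
    ("registration", ["register", "registration", "sign up", "account creation"]),
    ("password_complexity", ["password complexity", "password rules", "password requirements", "minimum length", "special characters", "uppercase", "lowercase", "numbers"]),
    ("password_attempts", ["wrong password", "incorrect password", "failed attempts", "attempts", "lock account", "lockout", "brute force", "wait", "hour"]),
    ("security", ["security"]),
    ("email", ["email"]),
    ("user_management", ["user", "account", "profile", "role"]) ]

def pvStep (s : PySem.Set String) (p : String × Bool) : PySem.Set String :=
  if p.2 then PySem.Set.add s p.1 else s

def pvPairs (q : String) : List (String × Bool) :=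
  pvTable.map (fun t => (t.1, t.2.any (fun w => PySem.Str.isIn w q)))

lemma pvExtract_eq_foldl (q : String) :
    pvExtractTopics q = (pvPairs q).foldl pvStep PySem.Set.empty := by
  simp only [pvPairs, pvTable, List.map_cons, List.map_nil, List.foldl_cons, List.foldl_nil,
    pvStep, pvExtractTopics, List.any_cons, List.any_nil, Bool.or_false]

lemma pv_mem_foldl (x : String) : ∀ (pairs : List (String × Bool)) (s0 : PySem.Set String),
    x ∈ pairs.foldl pvStep s0 ↔ x ∈ s0 ∨ ∃ p ∈ pairs, p.1 = x ∧ p.2 = true := by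
  intro pairs
  induction pairs with
  | nil => simp
  | cons p rest ih =>
    intro s0
    rw [List.foldl_cons, ih]
    unfold pvStep
    by_cases hb : p.2 = true
    · rw [if_pos hb, PySem.Set.mem_add]
      constructor
      · rintro (⟨h | h⟩ | ⟨q, hq, h1, h2⟩)
        · exact Or.inl h
        · exact Or.inr ⟨p, List.mem_cons_self .., h.symm, hb⟩
        · exact Or.inr ⟨q, List.mem_cons_of_mem _ hq, h1, h2⟩
      · rintro (h | ⟨q, hq, h1, h2⟩)
        · exact Or.inl (Or.inl h)
        · rcases List.mem_cons.mp hq with rfl | hq'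
          · exact Or.inl (Or.inr h1.symm)
          · exact Or.inr ⟨q, hq', h1, h2⟩
    · rw [if_neg hb]
      constructor
      · rintro (h | ⟨q, hq, h1, h2⟩)
        · exact Or.inl h
        · exact Or.inr ⟨q, List.mem_cons_of_mem _ hq, h1, h2⟩
      · rintro (h | ⟨q, hq, h1, h2⟩)
        · exact Or.inl h
        · rcases List.mem_cons.mp hq with rfl | hq'
          · exact absurd h2 hb
          · exact Or.inr ⟨q, hq', h1, h2⟩

-- bool(s & t): the intersection is nonempty iff the sets share an element
lemma pv_inter_nonempty (l1 l2 : PySem.Set String) :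
    ((!(PySem.Set.inter l1 l2).isEmpty) = true) ↔ ∃ x, x ∈ l1 ∧ x ∈ l2 := by
  rw [Bool.not_eq_eq_eq_not, Bool.not_true, List.isEmpty_eq_false_iff_exists_mem]
  simp [PySem.Set.mem_inter]

-- pvTable's topic names are pairwise distinct, so a shared name pins down the entry
lemma pv_table_inj : ∀ t ∈ pvTable, ∀ t' ∈ pvTable, t.1 = t'.1 → t = t' := by decide

lemma pv_keywords_eq : pvTopicKeywords = pvTable.map (·.2) := by decide

-- ===== VERDICT (by name: the statement is the Claim_ definition above) =====
theorem are_questions_about_same_topic_py_spec : Claim_equal_are_questions_about_same_topic_py := by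
  intro q1 q2 _
  unfold Spec_are_questions_about_same_topic_py
  rw [Bool.eq_iff_iff]
  unfold are_questions_about_same_topic_py are_questions_about_same_topic_py_alt
  rw [pvExtract_eq_foldl, pvExtract_eq_foldl, pv_keywords_eq, pv_inter_nonempty,
    List.any_eq_true]
  constructor
  · rintro ⟨x, hx1, hx2⟩
    rw [pv_mem_foldl] at hx1 hx2
    rcases hx1 with h | ⟨p1, hp1, hx1, hc1⟩
    · exact absurd h (by simp [PySem.Set.empty])
    rcases hx2 with h | ⟨p2, hp2, hx2, hc2⟩
    · exact absurd h (by simp [PySem.Set.empty])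
    unfold pvPairs at hp1 hp2
    obtain ⟨t1, ht1, rfl⟩ := List.mem_map.mp hp1
    obtain ⟨t2, ht2, rfl⟩ := List.mem_map.mp hp2
    have ht : t1 = t2 := pv_table_inj t1 ht1 t2 ht2 (by simpa using hx1.trans hx2.symm)
    subst ht
    exact ⟨t1.2, List.mem_map.mpr ⟨t1, ht1, rfl⟩,
      by rw [Bool.and_eq_true]; exact ⟨hc1, hc2⟩⟩
  · rintro ⟨kws, hk, hb⟩
    obtain ⟨t, ht, rfl⟩ := List.mem_map.mp hk
    rw [Bool.and_eq_true] at hb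
    obtain ⟨h1, h2⟩ := hb
    refine ⟨t.1, ?_, ?_⟩
    · exact (pv_mem_foldl t.1 (pvPairs q1) _).mpr
        (Or.inr ⟨_, List.mem_map.mpr ⟨t, ht, rfl⟩, rfl, h1⟩)
    · exact (pv_mem_foldl t.1 (pvPairs q2) _).mpr
        (Or.inr ⟨_, List.mem_map.mpr ⟨t, ht, rfl⟩, rfl, h2⟩)
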